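-- pv_equiv track=rewrite | github.com/nex-agi/NexAU | nexau/archs/session/orm/filters/converter.py | _convert_like_pattern_to_regex
-- ===== SOURCE A (Python) =====
-- def _convert_like_pattern_to_regex(pattern: str) -> str:
--     """将 SQL LIKE 模式转换为正则表达式.
--
--     SQL LIKE 通配符:
--     - % 匹配任意数量的字符（包括零个）
--     - _ 匹配单个字符
--
--     Args:
--         pattern: SQL LIKE 模式字符串
--
--     Returns:
--         等价的正则表达式字符串
--     """
--     # 首先转义所有正则表达式特殊字符
--     # 但保留 % 和 _ 用于后续转换
--     result = ""
--     i = 0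
--     while i < len(pattern):
--         char = pattern[i]
--         if char == "%":
--             result += ".*"
--         elif char == "_":
--             result += "."
--         elif char in r"\^$.|?*+()[]{}":
--             # 转义正则表达式特殊字符
--             result += "\\" + char
--         else:
--             result += char
--         i += 1
--
--     # 添加锚点以确保完整匹配
--     return "^" + result + "$"
-- ===== SOURCE B (Python) =====
-- import re
--
-- _LIKE_SPECIALS = re.compile(r"[%_\\^$.|?*+()\[\]{}]")
--
-- def _like_repl(m):
--     c = m.group(0)
--     if c == "%":
--         return ".*"
--     if c == "_":
--         return "."
--     return "\\" + c
--
-- def _convert_like_pattern_to_regex(pattern: str) -> str: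
--     return "^" + _LIKE_SPECIALS.sub(_like_repl, pattern) + "$"
-- ===== Notes on version B (the rewrite author's own statement) =====
-- stated objective: faster
-- what changed: Replaces the manual index-based while-loop with quadratic string concatenation by a single precompiled re.sub over a character class covering exactly %, _ and the regex metacharacters, with a replacement callback.
import Mathlib
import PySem

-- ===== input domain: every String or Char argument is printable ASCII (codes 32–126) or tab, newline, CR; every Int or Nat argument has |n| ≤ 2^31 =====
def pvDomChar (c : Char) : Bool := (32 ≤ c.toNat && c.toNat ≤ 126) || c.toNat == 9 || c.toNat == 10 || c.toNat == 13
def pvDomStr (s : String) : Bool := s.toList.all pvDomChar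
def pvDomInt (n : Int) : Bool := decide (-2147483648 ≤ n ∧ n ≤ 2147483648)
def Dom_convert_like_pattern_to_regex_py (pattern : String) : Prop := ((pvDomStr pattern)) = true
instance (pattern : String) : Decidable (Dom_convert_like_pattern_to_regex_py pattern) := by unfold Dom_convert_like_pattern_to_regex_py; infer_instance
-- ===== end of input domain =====

-- B replaces A's index-scanning while-loop with a single regex substitution (character
-- class + replacement callback); same return value, idiomatic rewrite.

-- ===== PORT A =====
-- the escape set r"\^$.|?*+()[]{}" as a list of chars; 'char in <str>' for a single
-- char is exactly list membership
def pvLikeSpecials : List Char := ['\\', '^', '$', '.', '|', '?', '*', '+', '(', ')', '[', ']', '{', '}']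

-- the while-loop: i runs over the indices, char = pattern[i]; ported as structural
-- recursion over the remaining characters, carrying the accumulator `result`
def pvALoop : List Char → String → String
  | [], result => result
  | c :: rest, result =>
      pvALoop rest
        (if c = '%' then result ++ ".*"
         else if c = '_' then result ++ "."
         else if c ∈ pvLikeSpecials then result ++ "\\" ++ String.singleton c
         else result ++ String.singleton c)

def convert_like_pattern_to_regex_py (pattern : String) : String :=
  "^" ++ pvALoop pattern.toList "" ++ "$"

-- ===== PORT B =====
-- B's replacement callback _like_repl, returning the substitute text as chars
def pvLikeRepl (c : Char) : List Char :=
  if c = '%' then ['.', '*']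
  else if c = '_' then ['.']
  else ['\\', c]

-- re.sub with a single-character class: each char matching the class is replaced by the
-- callback's value, every other char is copied; exact for this pattern
def pvSub (c : Char) : List Char :=
  if c = '%' ∨ c = '_' ∨ c ∈ pvLikeSpecials then pvLikeRepl c else [c]

def convert_like_pattern_to_regex_py_alt (pattern : String) : String :=
  "^" ++ String.ofList (pattern.toList.flatMap pvSub) ++ "$"

-- ===== PRECONDITION & SPEC =====
def Spec_convert_like_pattern_to_regex_py (pattern : String) (out : String) : Prop := out = convert_like_pattern_to_regex_py_alt pattern
instance (pattern : String) (out : String) : Decidable (Spec_convert_like_pattern_to_regex_py pattern out) := by unfold Spec_convert_like_pattern_to_regex_py; infer_instance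

-- ===== CLAIM (what is proved, stated in full; the proofs are below) =====
def Claim_equal_convert_like_pattern_to_regex_py : Prop := ∀ (pattern : String), Dom_convert_like_pattern_to_regex_py pattern → Spec_convert_like_pattern_to_regex_py pattern (convert_like_pattern_to_regex_py pattern)

-- ===== LEMMAS AND PROOFS =====

-- ===== VERDICT (by name: the statement is the Claim_ definition above) =====
lemma pvStep_eq (c : Char) (r : String) :
    (if c = '%' then r ++ ".*"
     else if c = '_' then r ++ "."
     else if c ∈ pvLikeSpecials then r ++ "\\" ++ String.singleton c
     else r ++ String.singleton c) = r ++ String.ofList (pvSub c) := by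
  by_cases h1 : c = '%'
  · subst h1; rfl
  · by_cases h2 : c = '_'
    · subst h2; rfl
    · by_cases h3 : c ∈ pvLikeSpecials
      · simp only [h1, h2, h3, pvSub, pvLikeRepl, if_false, if_true, or_true,
          if_neg h1, if_neg h2, if_pos h3]
        rw [String.singleton_eq_ofList, String.append_assoc,
          show ("\\" : String) = String.ofList ['\\'] from rfl, ← String.ofList_append]
        rfl
      · have hs : ¬ (c = '%' ∨ c = '_' ∨ c ∈ pvLikeSpecials) := by
          simp [h1, h2, h3]
        simp only [if_neg h1, if_neg h2, if_neg h3, pvSub, if_neg hs]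
        rw [String.singleton_eq_ofList]

lemma pvALoop_flatMap (l : List Char) (r : String) :
    pvALoop l r = r ++ String.ofList (l.flatMap pvSub) := by
  induction l generalizing r with
  | nil => simp [pvALoop]
  | cons c rest ih =>
      rw [pvALoop, ih, pvStep_eq, List.flatMap_cons, String.append_assoc,
        ← String.ofList_append]

theorem convert_like_pattern_to_regex_py_spec : Claim_equal_convert_like_pattern_to_regex_py := by
  intro pattern _
  unfold Spec_convert_like_pattern_to_regex_py
  unfold convert_like_pattern_to_regex_py convert_like_pattern_to_regex_py_alt
  rw [pvALoop_flatMap, String.empty_append]
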